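-- pv_equiv track=rewrite | github.com/TahuatauTempeh/Randoms | Tugas/Semester 1/Praktikum DasPro/Pertemuan 11 Responsi : Azka Aqylla Maulana_24060124140195_A2/siswa terpilih.py | IsMemberLS
-- ===== SOURCE A (Python) =====
-- def FirstList(s):
--     return s[0]
--
-- def TailList(s):
--     return s[1:]
--
-- def IsEmpty(s):
--     return s == []
--
-- def isAtom(s):
--     return type(s) != list
--
-- def IsEqual(s1, s2):
--     if len(s1) == len(s2):
--         if IsEmpty(s1) and IsEmpty(s2):
--             return True
--         else:
--             return FirstList(s1) == FirstList(s2) and IsEqual(TailList(s1), TailList(s2))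
--     else:
--         return False
--
-- def IsMemberLS(l, s):
--     if IsEmpty(s):
--         return False
--     else:
--         if isAtom(FirstList(s)):
--             return IsMemberLS(l, TailList(s))
--         else:
--             if IsEqual(FirstList(s), l):
--                 return True
--             else:
--                 return IsMemberLS(l, TailList(s))
-- ===== SOURCE B (Python) =====
-- def IsMemberLS(l, s):
--     for x in s:
--         if type(x) == list and x == l:
--             return True
--     return False
-- ===== Notes on version B (the rewrite author's own statement) =====
-- stated objective: simpler
-- what changed: Replaces the recursive traversal of s and the hand-rolled element-wise IsEqual recursion with a single iterative for-loop using Python's built-in list equality (keeping the exact type(x) == list test).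
import Mathlib
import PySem

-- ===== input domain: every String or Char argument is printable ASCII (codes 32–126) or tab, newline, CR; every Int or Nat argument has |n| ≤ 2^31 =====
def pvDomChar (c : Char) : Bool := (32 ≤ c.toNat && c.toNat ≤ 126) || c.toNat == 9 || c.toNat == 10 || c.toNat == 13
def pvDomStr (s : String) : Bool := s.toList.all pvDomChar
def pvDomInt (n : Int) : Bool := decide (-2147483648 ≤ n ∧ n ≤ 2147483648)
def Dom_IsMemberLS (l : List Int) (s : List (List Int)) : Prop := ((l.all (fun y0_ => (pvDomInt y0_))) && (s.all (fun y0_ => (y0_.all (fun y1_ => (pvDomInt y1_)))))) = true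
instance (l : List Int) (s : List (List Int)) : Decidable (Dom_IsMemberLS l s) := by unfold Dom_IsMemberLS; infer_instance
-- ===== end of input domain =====

-- B replaces A's recursive traversal and hand-rolled IsEqual recursion with one iterative
-- any-loop using built-in list equality (simpler decomposition; same cost).


-- ===== PORT A =====
-- IsEqual(s1, s2): length check, then FirstList/TailList recursion.
-- The inner match replaces FirstList/TailList; under the length test both lists are
-- nonempty in the recursive branch, so the catch-all is unreachable.
def pyIsEqual : List Int → List Int → Bool
  | s1, s2 =>
    if s1.length = s2.length then
      if s1.isEmpty && s2.isEmpty then true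
      else
        match s1, s2 with
        | a :: t1, b :: t2 => (a == b) && pyIsEqual t1 t2
        | _, _ => false
  else false

-- isAtom(FirstList(s)) = (type(s[0]) != list) is always False under the typed
-- convention s : List (List Int), so only A's else-branch is reachable.
def IsMemberLS (l : List Int) (s : List (List Int)) : Bool :=
  match s with
  | [] => false
  | h :: t => if pyIsEqual h l then true else IsMemberLS l t

-- ===== PORT B =====
-- `for x in s: if type(x) == list and x == l: return True` / `return False`;
-- type(x) == list is always True under the typed convention, x == l is List.beq.
def IsMemberLS_alt (l : List Int) (s : List (List Int)) : Bool :=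
  s.any (fun x => x == l)

-- ===== PRECONDITION & SPEC =====
def Spec_IsMemberLS (l : List Int) (s : List (List Int)) (out : Bool) : Prop := out = IsMemberLS_alt l s
instance (l : List Int) (s : List (List Int)) (out : Bool) : Decidable (Spec_IsMemberLS l s out) := by unfold Spec_IsMemberLS; infer_instance

-- ===== CLAIM (what is proved, stated in full; the proofs are below) =====
def Claim_equal_IsMemberLS : Prop := ∀ (l : List Int) (s : List (List Int)), Dom_IsMemberLS l s → Spec_IsMemberLS l s (IsMemberLS l s)

-- ===== LEMMAS AND PROOFS =====
theorem pyIsEqual_eq_beq (s1 s2 : List Int) : pyIsEqual s1 s2 = (s1 == s2) := by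
  induction s1 generalizing s2 with
  | nil => cases s2 <;> simp [pyIsEqual]
  | cons a t ih =>
    cases s2 with
    | nil => simp [pyIsEqual]
    | cons b t2 =>
      rw [pyIsEqual]
      by_cases h : (a :: t).length = (b :: t2).length
      · simp [h, ih, List.cons_beq_cons]
      · have hlen : t.length ≠ t2.length := by simpa using h
        have hne : (t == t2) = false :=
          beq_eq_false_iff_ne.mpr (fun e => hlen (by rw [e]))
        simp [List.cons_beq_cons, hne]
        intro hl
        exact absurd hl hlen

theorem IsMemberLS_eq_alt (l : List Int) (s : List (List Int)) :
    IsMemberLS l s = IsMemberLS_alt l s := by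
  induction s with
  | nil => simp [IsMemberLS, IsMemberLS_alt]
  | cons h t ih =>
    simp only [IsMemberLS, IsMemberLS_alt, List.any_cons] at *
    rw [pyIsEqual_eq_beq]
    by_cases hc : (h == l) = true <;> simp [hc, ih]

-- ===== VERDICT (by name: the statement is the Claim_ definition above) =====
theorem IsMemberLS_spec : Claim_equal_IsMemberLS := by
  intro l s _
  exact IsMemberLS_eq_alt l s
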